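-- pv_equiv track=rewrite | github.com/jim-at-jibba/my-dots | shellscripts/git/code_review_tool/git/repository.py | _filter_excluded_files
-- ===== SOURCE A (Python) =====
-- from typing import List, Optional, Tuple
--
-- def _filter_excluded_files(diff: str, exclude_files: List[str]) -> str:
--     """Remove excluded files from diff"""
--     lines = diff.split('\n')
--     filtered_lines = []
--     current_file = None
--     skip_current_file = False
--
--     for line in lines:
--         if line.startswith('diff --git'):
--             # Check if this file should be excluded
--             current_file = line
--             skip_current_file = any(excluded in line for excluded in exclude_files)
--
--             if not skip_current_file:
--                 filtered_lines.append(line)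
--         elif not skip_current_file:
--             filtered_lines.append(line)
--
--     return '\n'.join(filtered_lines)
-- ===== SOURCE B (Python) =====
-- def _filter_excluded_files(diff, exclude_files):
--     """Remove excluded files from diff: group lines into blocks, keep non-excluded blocks."""
--     lines = diff.split('\n')
--     blocks = []
--     current = []
--     for line in lines:
--         if line.startswith('diff --git'):
--             blocks.append(current)
--             current = [line]
--         else:
--             current.append(line)
--     blocks.append(current)
--     kept = list(blocks[0])  # preamble (lines before any header) is always kept
--     for block in blocks[1:]:
--         if not any(excluded in block[0] for excluded in exclude_files):
--             kept.extend(block)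
--     return '\n'.join(kept)
-- ===== Notes on version B (the rewrite author's own statement) =====
-- stated objective: alternative
-- what changed: A streams the lines once with a running skip-flag; B first partitions the lines into a preamble plus one block per 'diff --git' header, then keeps the preamble and every block whose header matches no exclusion, and joins the kept blocks.
import Mathlib
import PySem

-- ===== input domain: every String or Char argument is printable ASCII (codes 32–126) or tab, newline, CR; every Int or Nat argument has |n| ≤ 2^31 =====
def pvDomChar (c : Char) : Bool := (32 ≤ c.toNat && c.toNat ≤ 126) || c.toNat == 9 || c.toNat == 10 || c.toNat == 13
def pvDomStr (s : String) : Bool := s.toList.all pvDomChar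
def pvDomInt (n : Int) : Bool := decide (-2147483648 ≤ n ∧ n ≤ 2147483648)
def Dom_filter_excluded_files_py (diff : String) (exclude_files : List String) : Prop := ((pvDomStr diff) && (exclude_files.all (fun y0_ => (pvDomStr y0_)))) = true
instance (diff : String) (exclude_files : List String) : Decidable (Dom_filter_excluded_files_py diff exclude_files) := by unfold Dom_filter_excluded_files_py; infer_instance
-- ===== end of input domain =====

-- B replaces A's one-pass skip-flag scan by a group-into-blocks pass followed by a
-- filter over whole blocks (alternative decomposition, same cost).

-- shared helper: 'any(excluded in line for excluded in exclude_files)'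
def pvSkip (exclude_files : List String) (line : String) : Bool :=
  exclude_files.any (fun excluded => PySem.Str.isIn excluded line)

-- ===== PORT A =====
-- loop body of A's for-loop: state = (filtered_lines, skip_current_file)
-- (A's variable current_file is dead — it never influences the result — and is omitted)
def pvStepA (exclude_files : List String) (st : List String × Bool) (line : String) :
    List String × Bool :=
  if PySem.Str.startswith line "diff --git" then
    let skip := pvSkip exclude_files line
    if !skip then (st.1 ++ [line], skip) else (st.1, skip)
  else
    if !st.2 then (st.1 ++ [line], st.2) else st

def filter_excluded_files_py (diff : String) (exclude_files : List String) : String :=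
  -- diff.split('\n'): the separator is the nonempty literal "\n", so split? is always some
  let lines := (PySem.Str.split? diff "\n").getD []
  let st := lines.foldl (pvStepA exclude_files) ([], false)
  PySem.Str.join "\n" st.1

-- ===== PORT B =====
-- grouping loop body of B: state = (closed blocks, current block)
def pvStepB (st : List (List String) × List String) (line : String) :
    List (List String) × List String :=
  if PySem.Str.startswith line "diff --git" then (st.1 ++ [st.2], [line])
  else (st.1, st.2 ++ [line])

-- 'not any(excluded in block[0] …)' (blocks after the preamble always start with their header)
def pvKeep (exclude_files : List String) (b : List String) : Bool :=
  !(pvSkip exclude_files (b.headD ""))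

def filter_excluded_files_py_alt (diff : String) (exclude_files : List String) : String :=
  let lines := (PySem.Str.split? diff "\n").getD []
  let st := lines.foldl pvStepB ([], [])
  let blocks := st.1 ++ [st.2]
  let kept := blocks.headD [] ++ ((blocks.drop 1).filter (pvKeep exclude_files)).flatten
  PySem.Str.join "\n" kept

-- ===== PRECONDITION & SPEC =====
def Spec_filter_excluded_files_py (diff : String) (exclude_files : List String) (out : String) : Prop := out = filter_excluded_files_py_alt diff exclude_files
instance (diff : String) (exclude_files : List String) (out : String) : Decidable (Spec_filter_excluded_files_py diff exclude_files out) := by unfold Spec_filter_excluded_files_py; infer_instance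

-- ===== CLAIM (what is proved, stated in full; the proofs are below) =====
def Claim_equal_filter_excluded_files_py : Prop := ∀ (diff : String) (exclude_files : List String), Dom_filter_excluded_files_py diff exclude_files → Spec_filter_excluded_files_py diff exclude_files (filter_excluded_files_py diff exclude_files)

-- ===== LEMMAS AND PROOFS =====

-- the list of lines both programs keep, as one recursion over the lines
def pvGo (ex : List String) : Bool → List String → List String
  | _, [] => []
  | skip, l :: ls =>
    if PySem.Str.startswith l "diff --git" then
      if pvSkip ex l then pvGo ex true ls else l :: pvGo ex false ls
    else if skip then pvGo ex skip ls else l :: pvGo ex skip ls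

lemma foldA_eq (ex : List String) :
    ∀ (ls acc : List String) (skip : Bool),
      (ls.foldl (pvStepA ex) (acc, skip)).1 = acc ++ pvGo ex skip ls := by
  intro ls
  induction ls with
  | nil => intro acc skip; simp [pvGo]
  | cons l ls ih =>
    intro acc skip
    rw [List.foldl_cons]
    by_cases hh : PySem.Str.startswith l "diff --git" = true
    · by_cases hs : pvSkip ex l = true
      · have hstep : pvStepA ex (acc, skip) l = (acc, true) := by
          simp only [pvStepA]; rw [if_pos hh]; simp [hs]
        rw [hstep, ih]
        simp only [pvGo]; rw [if_pos hh, if_pos hs]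
      · have hstep : pvStepA ex (acc, skip) l = (acc ++ [l], false) := by
          simp only [Bool.not_eq_true] at hs
          simp only [pvStepA]; rw [if_pos hh]
          simp [hs]
        rw [hstep, ih]
        simp only [pvGo]; rw [if_pos hh, if_neg hs]
        simp
    · cases skip with
      | false =>
        have hstep : pvStepA ex (acc, false) l = (acc ++ [l], false) := by
          simp only [pvStepA]; rw [if_neg hh]; simp
        rw [hstep, ih]
        simp only [pvGo]; rw [if_neg hh]
        simp
      | true =>
        have hstep : pvStepA ex (acc, true) l = (acc, true) := by
          simp only [pvStepA]; rw [if_neg hh]; simp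
        rw [hstep, ih]
        simp only [pvGo]; rw [if_neg hh]
        simp
lemma foldB_shift :
    ∀ (ls : List String) (bs : List (List String)) (cur : List String),
      ls.foldl pvStepB (bs, cur)
        = (bs ++ (ls.foldl pvStepB ([], cur)).1, (ls.foldl pvStepB ([], cur)).2) := by
  intro ls
  induction ls with
  | nil => intro bs cur; simp
  | cons l ls ih =>
    intro bs cur
    simp only [List.foldl_cons, pvStepB, List.nil_append]
    by_cases hh : PySem.Str.startswith l "diff --git" = true
    · rw [if_pos hh, if_pos hh, ih (bs ++ [cur]) [l], ih [cur] [l]]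
      simp
    · rw [if_neg hh, if_neg hh, ih bs (cur ++ [l])]

-- output contributed by the remaining block list once the current block is cur and lines ls remain
def pvK (ex : List String) (cur : List String) (ls : List String) : List String :=
  let st := ls.foldl pvStepB ([], cur)
  ((st.1 ++ [st.2]).filter (pvKeep ex)).flatten

lemma pvK_eq (ex : List String) :
    ∀ (ls cur : List String), cur ≠ [] →
      pvK ex cur ls
        = (if pvKeep ex cur then cur else []) ++ pvGo ex (pvSkip ex (cur.headD "")) ls := by
  intro ls
  induction ls with
  | nil =>
    intro cur _
    by_cases hc : pvKeep ex cur <;> simp [pvK, pvGo, hc]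
  | cons l ls ih =>
    intro cur hcur
    simp only [pvK, List.foldl_cons, pvStepB, List.nil_append]
    by_cases hh : PySem.Str.startswith l "diff --git" = true
    · rw [if_pos hh, foldB_shift ls [cur] [l]]
      have hK := ih [l] (by simp)
      simp only [pvK, List.headD_cons] at hK
      simp only [List.cons_append, List.filter_cons, List.nil_append]
      simp only [pvGo]; rw [if_pos hh]
      have hkl : pvKeep ex [l] = !(pvSkip ex l) := by simp [pvKeep]
      by_cases hc : pvKeep ex cur = true
      · rw [if_pos hc, if_pos hc, List.flatten_cons, hK]
        by_cases hs : pvSkip ex l = true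
        · rw [if_pos hs]; simp [hkl, hs]
        · simp only [Bool.not_eq_true] at hs
          rw [if_neg (by simp [hs] : ¬ pvSkip ex l = true)]; simp [hkl, hs]
      · rw [if_neg hc, if_neg hc, hK]
        by_cases hs : pvSkip ex l = true
        · rw [if_pos hs]; simp [hkl, hs]
        · simp only [Bool.not_eq_true] at hs
          rw [if_neg (by simp [hs] : ¬ pvSkip ex l = true)]; simp [hkl, hs]
    · rw [if_neg hh]
      have hK := ih (cur ++ [l]) (by simp)
      simp only [pvK] at hK
      rw [hK]
      have hhead : (cur ++ [l]).headD "" = cur.headD "" := by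
        cases cur with
        | nil => exact absurd rfl hcur
        | cons a t => simp
      have hkeep : pvKeep ex (cur ++ [l]) = pvKeep ex cur := by
        simp only [pvKeep, hhead]
      rw [hkeep, hhead]
      simp only [pvGo]; rw [if_neg hh]
      by_cases hs : pvSkip ex (cur.headD "") = true
      · have hc : pvKeep ex cur = false := by simp only [pvKeep, hs]; rfl
        simp only [List.headD_eq_head?_getD] at hs
        simp [hc, hs]
      · simp only [Bool.not_eq_true] at hs
        have hc : pvKeep ex cur = true := by simp only [pvKeep, hs]; rfl
        simp only [List.headD_eq_head?_getD] at hs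
        simp [hc, hs]

lemma foldB_assemble (ex : List String) :
    ∀ (ls cur : List String),
      (let st := ls.foldl pvStepB ([], cur)
       let blocks := st.1 ++ [st.2]
       blocks.headD [] ++ ((blocks.drop 1).filter (pvKeep ex)).flatten)
        = cur ++ pvGo ex false ls := by
  intro ls
  induction ls with
  | nil => intro cur; simp [pvGo]
  | cons l ls ih =>
    intro cur
    simp only [List.foldl_cons, pvStepB, List.nil_append]
    by_cases hh : PySem.Str.startswith l "diff --git" = true
    · rw [if_pos hh, foldB_shift ls [cur] [l]]
      have hK := pvK_eq ex ls [l] (by simp)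
      simp only [pvK, List.headD_cons] at hK
      simp only [List.cons_append, List.headD_cons, List.drop_succ_cons, List.drop_zero,
        List.nil_append]
      rw [hK]
      simp only [pvGo]; rw [if_pos hh]
      have hkl : pvKeep ex [l] = !(pvSkip ex l) := by simp [pvKeep]
      by_cases hs : pvSkip ex l = true
      · rw [if_pos hs]; simp [hkl, hs]
      · simp only [Bool.not_eq_true] at hs
        rw [if_neg (by simp [hs] : ¬ pvSkip ex l = true)]; simp [hkl, hs]
    · rw [if_neg hh]
      have hB := ih (cur ++ [l])
      simp only at hB
      rw [hB]
      simp only [pvGo]; rw [if_neg hh]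
      simp

-- ===== VERDICT (by name: the statement is the Claim_ definition above) =====
theorem filter_excluded_files_py_spec : Claim_equal_filter_excluded_files_py := by
  intro diff ex _
  show filter_excluded_files_py diff ex = filter_excluded_files_py_alt diff ex
  have lines := (PySem.Str.split? diff "\n").getD []
  have hA : filter_excluded_files_py diff ex
      = PySem.Str.join "\n" ((((PySem.Str.split? diff "\n").getD []).foldl
          (pvStepA ex) ([], false)).1) := rfl
  have hB : filter_excluded_files_py_alt diff ex
      = PySem.Str.join "\n"
          (let st := ((PySem.Str.split? diff "\n").getD []).foldl pvStepB ([], [])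
           let blocks := st.1 ++ [st.2]
           blocks.headD [] ++ ((blocks.drop 1).filter (pvKeep ex)).flatten) := rfl
  rw [hA, hB, foldA_eq ex ((PySem.Str.split? diff "\n").getD []) [] false]
  have h := foldB_assemble ex ((PySem.Str.split? diff "\n").getD []) []
  simp only at h
  rw [h]
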